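-- pv_equiv track=rewrite | github.com/neskk/PoGo-Proxies | proxytools/scrappers/sockslist.py | parse_crazy_encoding
-- ===== SOURCE A (Python) =====
-- def parse_crazy_encoding(code):
--     dictionary = {}
--     variables = code.split(';')
--     for var in variables:
--         if '=' in var:
--             assignment = var.split(' = ')
--             dictionary[assignment[0]] = assignment[1]
--
--     for var in dictionary:
--         recursive_decode(dictionary, var)
--     return dictionary
--
-- def recursive_decode(dictionary, var):
--     if var.isdigit():
--         return var
--
--     value = dictionary[var]
--     if value.isdigit():
--         return value
--     elif '^' in value:
--         l_value, r_value = value.split('^')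
--         answer = str(int(recursive_decode(dictionary, l_value)) ^
--                      int(recursive_decode(dictionary, r_value)))
--         dictionary[var] = answer
--         return answer
-- ===== SOURCE B (Python) =====
-- def parse_crazy_encoding(code):
--     # Iterative fixpoint resolver: repeated relaxation rounds over the still-
--     # unresolved XOR entries instead of the recursive helper.
--     dictionary = {}
--     for chunk in code.split(';'):
--         if '=' in chunk:
--             parts = chunk.split(' = ')
--             dictionary[parts[0]] = parts[1]
--     pending = [k for k in dictionary
--                if not k.isdigit() and not dictionary[k].isdigit()
--                and '^' in dictionary[k]]
--     while pending:
--         rest = []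
--         for k in pending:
--             left, right = dictionary[k].split('^')
--             l = left if left.isdigit() else dictionary[left]
--             r = right if right.isdigit() else dictionary[right]
--             if l.isdigit() and r.isdigit():
--                 dictionary[k] = str(int(l) ^ int(r))
--             else:
--                 rest.append(k)
--         if len(rest) == len(pending):
--             break  # no progress: unresolvable references (original would raise)
--         pending = rest
--     return dictionary
-- ===== Notes on version B (the rewrite author's own statement) =====
-- stated objective: alternative
-- what changed: The recursive helper recursive_decode is replaced by an iterative fixpoint resolver: B collects the unresolved XOR entries once and then runs relaxation rounds, resolving every entry whose two operands are already digit strings, until nothing is pending; no recursion and no call stack, same parsing and the same returned dictionary.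
import Mathlib
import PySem

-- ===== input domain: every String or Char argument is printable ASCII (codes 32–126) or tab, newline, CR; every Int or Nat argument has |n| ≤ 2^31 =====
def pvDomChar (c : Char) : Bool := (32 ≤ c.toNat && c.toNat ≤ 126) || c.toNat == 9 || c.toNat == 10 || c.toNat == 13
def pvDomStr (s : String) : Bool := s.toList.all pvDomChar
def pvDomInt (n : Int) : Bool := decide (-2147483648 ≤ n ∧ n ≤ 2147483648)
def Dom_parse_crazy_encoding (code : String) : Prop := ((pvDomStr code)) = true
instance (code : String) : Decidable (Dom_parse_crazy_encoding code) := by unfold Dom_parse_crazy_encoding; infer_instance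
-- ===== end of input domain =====

-- B replaces the recursive XOR-reference decoder with an iterative fixpoint resolver
-- (relaxation rounds over the unresolved entries); equal return value on Pre_.


-- ===== PORT A =====
-- helper: recursive_decode(dictionary, var) — returns (mutated dict, returned value);
-- fuel only makes the Python recursion total (cyclic references raise RecursionError in
-- Python and are excluded by Pre_; inside Pre_ the fuel chosen below never runs out)
def pyRecursiveDecode (fuel : Nat) (d : PySem.Dict String String) (var : String) :
    PySem.Dict String String × Option String :=
  match fuel with
  | 0 => (d, none)
  | fuel + 1 =>
    if PySem.Str.strIsdigit var then (d, some var)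
    else
      let value := d.getD var ""          -- dictionary[var]; KeyError excluded by Pre_
      if PySem.Str.strIsdigit value then (d, some value)
      else if PySem.Str.isIn "^" value then
        let parts := (PySem.Str.split? value "^").getD []   -- exactly two parts under Pre_
        let lv := pyRecursiveDecode fuel d (parts.getD 0 "")
        let rv := pyRecursiveDecode fuel lv.1 (parts.getD 1 "")
        let answer := PySem.Int.toStr
          (PySem.Int.bxor ((PySem.Int.ofStr? (lv.2.getD "")).getD 0)
                          ((PySem.Int.ofStr? (rv.2.getD "")).getD 0))
        (rv.1.insert var answer, some answer)
      else (d, none)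

def parse_crazy_encoding (code : String) : List (String × String) :=
  let dictionary :=
    ((PySem.Str.split? code ";").getD []).foldl
      (fun d var =>
        if PySem.Str.isIn "=" var then
          let assignment := (PySem.Str.split? var " = ").getD []
          d.insert (assignment.getD 0 "") (assignment.getD 1 "")
        else d)
      PySem.Dict.empty
  let fuel := dictionary.size + 3
  (dictionary.keys.foldl (fun d var => (pyRecursiveDecode fuel d var).1) dictionary).items

-- ===== PORT B =====
-- one step of the inner `for k in pending` loop: state = (dictionary, rest)
def pyRoundStep (st : PySem.Dict String String × List String) (k : String) :
    PySem.Dict String String × List String :=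
  let parts := (PySem.Str.split? (st.1.getD k "") "^").getD []   -- exactly two under Pre_
  let left := parts.getD 0 ""
  let right := parts.getD 1 ""
  let l := if PySem.Str.strIsdigit left then left else st.1.getD left ""
  let r := if PySem.Str.strIsdigit right then right else st.1.getD right ""
  if PySem.Str.strIsdigit l && PySem.Str.strIsdigit r then
    (st.1.insert k (PySem.Int.toStr
       (PySem.Int.bxor ((PySem.Int.ofStr? l).getD 0) ((PySem.Int.ofStr? r).getD 0))), st.2)
  else (st.1, st.2 ++ [k])

-- a round step either resolves k in place or appends it to the worklist
lemma pyRoundStep_snd (st : PySem.Dict String String × List String) (k : String) :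
    (pyRoundStep st k).2 = st.2 ∨ (pyRoundStep st k).2 = st.2 ++ [k] := by
  simp only [pyRoundStep]
  split_ifs <;> simp

-- a whole round of the `for k in pending` loop
def pyRound (d : PySem.Dict String String) (pending : List String) :
    PySem.Dict String String × List String :=
  pending.foldl pyRoundStep (d, [])

-- a round never lengthens the worklist (cited by pyFix's termination proof)
lemma pyRound_len (l : List String) (st : PySem.Dict String String × List String) :
    (l.foldl pyRoundStep st).2.length ≤ st.2.length + l.length := by
  induction l generalizing st with
  | nil => simp
  | cons k l ih =>
    simp only [List.foldl_cons]
    have h := ih (pyRoundStep st k)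
    rcases pyRoundStep_snd st k with h2 | h2 <;> rw [h2] at h <;>
      simp only [List.length_append, List.length_cons, List.length_nil] at h ⊢ <;> omega

-- the `while pending:` loop; stops when a round makes no progress
def pyFix (d : PySem.Dict String String) (pending : List String) :
    PySem.Dict String String :=
  if pending.isEmpty then d
  else
    if (pyRound d pending).2.length = pending.length then (pyRound d pending).1
    else pyFix (pyRound d pending).1 (pyRound d pending).2
termination_by pending.length
decreasing_by
  have h := pyRound_len pending (d, [])
  simp only [List.length_nil, Nat.zero_add] at h
  rename_i _ h2
  unfold pyRound at *
  omega

def parse_crazy_encoding_alt (code : String) : List (String × String) :=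
  let dictionary :=
    ((PySem.Str.split? code ";").getD []).foldl
      (fun d chunk =>
        if PySem.Str.isIn "=" chunk then
          let parts := (PySem.Str.split? chunk " = ").getD []
          d.insert (parts.getD 0 "") (parts.getD 1 "")
        else d)
      PySem.Dict.empty
  let pending := dictionary.keys.filter
    (fun k => !PySem.Str.strIsdigit k && !PySem.Str.strIsdigit (dictionary.getD k "") &&
              PySem.Str.isIn "^" (dictionary.getD k ""))
  (pyFix dictionary pending).items

-- ===== PRECONDITION & SPEC =====
-- the variable dictionary the parsing loop builds (Pre_'s own copy, independent of the ports)
def pvEnv (code : String) : PySem.Dict String String :=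
  ((PySem.Str.split? code ";").getD []).foldl
    (fun d chunk =>
      if PySem.Str.isIn "=" chunk then
        d.insert (((PySem.Str.split? chunk " = ").getD []).getD 0 "")
                 (((PySem.Str.split? chunk " = ").getD []).getD 1 "")
      else d)
    PySem.Dict.empty

-- `pvRes env n k`: variable k's XOR reference chain is well formed and bottoms out in
-- digit literals within depth n — a property of the input's reference graph (acyclicity
-- with digit leaves), not a run of either program
def pvRes (env : PySem.Dict String String) : Nat → String → Bool
  | 0, _ => false
  | n + 1, k =>
    match env.get? k with
    | none => false
    | some v =>
      PySem.Str.strIsdigit v ||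
      (PySem.Str.isIn "^" v &&
       ((PySem.Str.split? v "^").getD []).length == 2 &&
       ((PySem.Str.strIsdigit (((PySem.Str.split? v "^").getD []).getD 0 "") ||
         pvRes env n (((PySem.Str.split? v "^").getD []).getD 0 "")) &&
        (PySem.Str.strIsdigit (((PySem.Str.split? v "^").getD []).getD 1 "") ||
         pvRes env n (((PySem.Str.split? v "^").getD []).getD 1 ""))))

-- an admissible operand: a digit literal, or a variable resolvable through the graph
def pvOp (env : PySem.Dict String String) (n : Nat) (t : String) : Bool :=
  PySem.Str.strIsdigit t || pvRes env n t

-- the evaluation condition on a variable dictionary (used by Pre_ on pvEnv code)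
def pvPreEnv (env : PySem.Dict String String) : Prop :=
  ∀ p ∈ env.items, PySem.Str.strIsdigit p.1 = false →
    PySem.Str.strIsdigit p.2 = false → PySem.Str.isIn "^" p.2 = true →
    ((PySem.Str.split? p.2 "^").getD []).length = 2 ∧
    pvOp env (env.size + 1) (((PySem.Str.split? p.2 "^").getD []).getD 0 "") = true ∧
    pvOp env (env.size + 1) (((PySem.Str.split? p.2 "^").getD []).getD 1 "") = true

-- Pre_ excludes exactly the inputs on which A raises: a chunk containing '=' but not
-- ' = ' (IndexError); and, for the XOR entries that get evaluated, an expression with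
-- a number of '^'-parts other than two (ValueError), an operand that is neither a digit
-- literal nor a defined variable (KeyError), an operand variable whose value is neither
-- a digit nor an XOR expression (TypeError on int(None)), and cyclic reference chains
-- (RecursionError).  On every input where A returns, Pre_ holds.
def Pre_parse_crazy_encoding (code : String) : Prop :=
  (∀ s ∈ (PySem.Str.split? code ";").getD [], PySem.Str.isIn "=" s = true →
      2 ≤ ((PySem.Str.split? s " = ").getD []).length) ∧
  pvPreEnv (pvEnv code)
instance (code : String) : Decidable (Pre_parse_crazy_encoding code) := by
  unfold Pre_parse_crazy_encoding pvPreEnv; infer_instance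

def pvWitness_parse_crazy_encoding : String := "a = 7;x = a^2"

def Spec_parse_crazy_encoding (code : String) (out : List (String × String)) : Prop := out = parse_crazy_encoding_alt code
instance (code : String) (out : List (String × String)) : Decidable (Spec_parse_crazy_encoding code out) := by unfold Spec_parse_crazy_encoding; infer_instance

-- ===== CLAIM (what is proved, stated in full; the proofs are below) =====
def Claim_equal_parse_crazy_encoding : Prop := ∀ (code : String), Dom_parse_crazy_encoding code → Pre_parse_crazy_encoding code → Spec_parse_crazy_encoding code (parse_crazy_encoding code)

-- ===== LEMMAS AND PROOFS =====

-- shape of an entry both programs rewrite: non-digit key bound to a non-digit XOR value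
def pvShape (env : PySem.Dict String String) (k : String) : Bool :=
  !PySem.Str.strIsdigit k &&
  (match env.get? k with
   | some v => !PySem.Str.strIsdigit v && PySem.Str.isIn "^" v
   | none => false)

-- the resolved string of a variable / operand, by depth-n evaluation over the original env
def pvEvS (env : PySem.Dict String String) : Nat → String → String
  | 0, _ => ""
  | n + 1, t =>
    if PySem.Str.strIsdigit t then t
    else
      match env.get? t with
      | none => ""
      | some v =>
        if PySem.Str.strIsdigit v then v
        else
          PySem.Int.toStr (PySem.Int.bxor
            ((PySem.Int.ofStr? (pvEvS env n (((PySem.Str.split? v "^").getD []).getD 0 ""))).getD 0)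
            ((PySem.Int.ofStr? (pvEvS env n (((PySem.Str.split? v "^").getD []).getD 1 ""))).getD 0))

-- the final value of a rewritten entry
def pvV (env : PySem.Dict String String) (k : String) : String :=
  pvEvS env (env.size + 3) k

-- both loops' dictionary invariant: keys unchanged, every entry original or correctly resolved
def pvIA (env d : PySem.Dict String String) : Prop :=
  d.keys = env.keys ∧
  ∀ k, d.get? k = env.get? k ∨ (pvShape env k = true ∧ d.get? k = some (pvV env k))

-- how a loop may transform the dictionary: rewrite Shape entries to their resolved value
def pvC (env d d' : PySem.Dict String String) : Prop :=
  d'.keys = d.keys ∧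
  ∀ k, d'.get? k = d.get? k ∨ (pvShape env k = true ∧ d'.get? k = some (pvV env k))

lemma pvC_refl (env d : PySem.Dict String String) : pvC env d d := ⟨rfl, fun _ => Or.inl rfl⟩

lemma pvC_trans {env d₁ d₂ d₃ : PySem.Dict String String}
    (h₁ : pvC env d₁ d₂) (h₂ : pvC env d₂ d₃) : pvC env d₁ d₃ := by
  refine ⟨h₂.1.trans h₁.1, fun k => ?_⟩
  rcases h₂.2 k with h | h
  · rw [h]; exact h₁.2 k
  · exact Or.inr h

lemma pvIA_of_pvC {env d d' : PySem.Dict String String}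
    (hIA : pvIA env d) (hC : pvC env d d') : pvIA env d' := by
  refine ⟨hC.1.trans hIA.1, fun k => ?_⟩
  rcases hC.2 k with h | h
  · rw [h]; exact hIA.2 k
  · exact Or.inr h

-- str(n) of a nonnegative int is a digit string
lemma pv_toStr_isdigit (n : Int) (h : 0 ≤ n) :
    PySem.Str.strIsdigit (PySem.Int.toStr n) = true := by
  rw [PySem.Str.strIsdigit_eq, PySem.Int.toList_toStr]
  have htc : PySem.Int.toChars n = Nat.toDigits 10 n.toNat := by
    simp [PySem.Int.toChars]; omega
  rw [htc]
  simp only [PySem.Chars.strIsdigit, Bool.and_eq_true, Bool.not_eq_true',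
    List.all_eq_true]
  refine ⟨?_, ?_⟩
  · have := @Nat.length_toDigits_pos 10 n.toNat
    rw [List.isEmpty_eq_false_iff]
    intro hh; rw [hh] at this; simp at this
  · intro c hc
    have hd := Nat.isDigit_of_mem_toDigits (by norm_num) (by norm_num) hc
    simp only [Char.isDigit] at hd
    simp only [PySem.Chars.isdigit, Bool.and_eq_true, decide_eq_true_eq, Char.le_def] at *
    omega

-- a digit is not int()-strippable whitespace
lemma pv_digit_not_space (c : Char) (h : PySem.Chars.isdigit c = true) :
    PySem.Int.isIntSpace c = false := by
  simp only [PySem.Chars.isdigit, Bool.and_eq_true, decide_eq_true_eq] at h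
  simp only [PySem.Int.isIntSpace, Bool.or_eq_false_iff, decide_eq_false_iff_not]
  refine ⟨⟨⟨⟨⟨?_,?_⟩,?_⟩,?_⟩,?_⟩,?_⟩ <;> rintro rfl <;> revert h <;> decide

-- int(s) of a digit string is nonnegative (on failure the fallback 0 is, too)
lemma pv_ofStrD_nonneg (s : String) (h : PySem.Str.strIsdigit s = true) :
    0 ≤ (PySem.Int.ofStr? s).getD 0 := by
  rw [PySem.Str.strIsdigit_eq] at h
  show 0 ≤ (PySem.Int.ofChars? s.toList).getD 0
  simp only [PySem.Chars.strIsdigit, Bool.and_eq_true, Bool.not_eq_true',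
    List.isEmpty_eq_false_iff, List.all_eq_true] at h
  obtain ⟨hne, hall⟩ := h
  generalize s.toList = cs at hne hall ⊢
  have hd1 : List.dropWhile PySem.Int.isIntSpace cs = cs := by
    cases cs with
    | nil => rfl
    | cons c rest =>
      rw [List.dropWhile_cons_of_neg (by simp [pv_digit_not_space c (hall c (by simp))])]
  have hd2 : List.dropWhile PySem.Int.isIntSpace cs.reverse = cs.reverse := by
    cases hrev : cs.reverse with
    | nil => rfl
    | cons c rest =>
      rw [List.dropWhile_cons_of_neg
        (by simp [pv_digit_not_space c (hall c (by
          have : c ∈ cs.reverse := by rw [hrev]; simp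
          simpa using this))])]
  unfold PySem.Int.ofChars?
  rw [hd1, hd2, List.reverse_reverse]
  cases cs with
  | nil => exact absurd rfl hne
  | cons c rest =>
    have hcd := hall c (by simp)
    have hc1 : c ≠ '-' := by rintro rfl; revert hcd; decide
    have hc2 : c ≠ '+' := by rintro rfl; revert hcd; decide
    dsimp only
    split
    · rename_i ds heq; injection heq with h1 h2; exact absurd h1 hc1
    · rename_i ds heq; injection heq with h1 h2; exact absurd h1 hc2
    · have aux : ∀ (X : Option ℕ),
        0 ≤ (Option.map (fun n : ℤ => n) (do let a ← X; pure ((a : ℤ)))).getD 0 := by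
        intro X; cases X <;> simp
      exact aux _

-- an admissible operand, from its two cases
lemma pvOp_of_or {env : PySem.Dict String String} {n : Nat} {t : String}
    (h : PySem.Str.strIsdigit t = true ∨ pvRes env n t = true) : pvOp env n t = true := by
  unfold pvOp
  rcases h with h | h
  · exact Bool.or_eq_true_iff.mpr (Or.inl h)
  · exact Bool.or_eq_true_iff.mpr (Or.inr h)

-- above the resolution depth the evaluated string no longer depends on the fuel
lemma pvEvS_stable (env : PySem.Dict String String) :
    ∀ n m t, pvOp env n t = true → n ≤ m → pvEvS env (m + 1) t = pvEvS env (n + 1) t := by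
  intro n
  induction n with
  | zero =>
    intro m t h _
    have hd : PySem.Str.strIsdigit t = true := by
      rcases Bool.or_eq_true_iff.mp h with h' | h'
      · exact h'
      · simp [pvRes] at h'
    obtain ⟨m', rfl⟩ : ∃ m', m = m' := ⟨m, rfl⟩
    rw [pvEvS, pvEvS, if_pos hd, if_pos hd]
  | succ n ih =>
    intro m t h hnm
    by_cases hd : PySem.Str.strIsdigit t = true
    · rw [pvEvS, pvEvS, if_pos hd, if_pos hd]
    · have hres : pvRes env (n + 1) t = true := by
        rcases Bool.or_eq_true_iff.mp h with h' | h'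
        · exact absurd h' hd
        · exact h'
      rw [pvRes] at hres
      rcases hv : env.get? t with _ | v
      · rw [hv] at hres; simp at hres
      · rw [hv] at hres; dsimp only at hres
        obtain ⟨m', rfl⟩ : ∃ m', m = m' + 1 := ⟨m - 1, by omega⟩
        rw [pvEvS, pvEvS, if_neg hd, if_neg hd, hv]
        dsimp only
        by_cases hvd : PySem.Str.strIsdigit v = true
        · rw [if_pos hvd, if_pos hvd]
        · rw [if_neg hvd, if_neg hvd]
          simp only [Bool.or_eq_true, Bool.and_eq_true] at hres
          rcases hres with h' | ⟨⟨_, _⟩, h3, h4⟩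
          · exact absurd h' hvd
          · rw [ih m' _ (pvOp_of_or h3) (by omega), ih m' _ (pvOp_of_or h4) (by omega)]

-- the evaluated string of an admissible operand is a digit string
set_option maxHeartbeats 1000000 in
lemma pvEvS_digit (env : PySem.Dict String String) :
    ∀ n t, pvOp env n t = true → PySem.Str.strIsdigit (pvEvS env (n + 1) t) = true := by
  intro n
  induction n with
  | zero =>
    intro t h
    have hd : PySem.Str.strIsdigit t = true := by
      rcases Bool.or_eq_true_iff.mp h with h' | h'
      · exact h'
      · simp [pvRes] at h'
    rw [pvEvS, if_pos hd]; exact hd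
  | succ n ih =>
    intro t h
    by_cases hd : PySem.Str.strIsdigit t = true
    · rw [pvEvS, if_pos hd]; exact hd
    · have hres : pvRes env (n + 1) t = true := by
        rcases Bool.or_eq_true_iff.mp h with h' | h'
        · exact absurd h' hd
        · exact h'
      rw [pvRes] at hres
      rcases hv : env.get? t with _ | v
      · rw [hv] at hres; simp at hres
      · rw [hv] at hres; dsimp only at hres
        rw [pvEvS, if_neg hd, hv]
        dsimp only
        by_cases hvd : PySem.Str.strIsdigit v = true
        · rw [if_pos hvd]; exact hvd
        · rw [if_neg hvd]
          simp only [Bool.or_eq_true, Bool.and_eq_true] at hres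
          rcases hres with h' | ⟨⟨_, _⟩, h3, h4⟩
          · exact absurd h' hvd
          · have hl := pv_ofStrD_nonneg _ (ih _ (pvOp_of_or h3))
            have hr := pv_ofStrD_nonneg _ (ih _ (pvOp_of_or h4))
            apply pv_toStr_isdigit
            rw [PySem.Int.bxor_of_nonneg hl hr]
            exact Int.natCast_nonneg _

-- the guarded parsing fold is the plain insert fold over the filtered chunks
lemma pv_env_filter (l : List String) (d : PySem.Dict String String) :
    l.foldl
      (fun d chunk =>
        if PySem.Str.isIn "=" chunk then
          d.insert (((PySem.Str.split? chunk " = ").getD []).getD 0 "")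
                   (((PySem.Str.split? chunk " = ").getD []).getD 1 "")
        else d) d
    = (l.filter (fun c => PySem.Str.isIn "=" c)).foldl
        (fun d chunk =>
          d.insert (((PySem.Str.split? chunk " = ").getD []).getD 0 "")
                   (((PySem.Str.split? chunk " = ").getD []).getD 1 "")) d := by
  induction l generalizing d with
  | nil => rfl
  | cons c l ih =>
    simp only [List.filter_cons, List.foldl_cons]
    by_cases hc : PySem.Str.isIn "=" c = true
    · rw [if_pos hc, if_pos hc]; exact ih _
    · rw [if_neg hc, if_neg hc]; exact ih _

lemma pv_env_keys_nodup (code : String) : (pvEnv code).keys.Nodup := by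
  unfold pvEnv
  rw [pv_env_filter]
  exact PySem.Dict.nodup_keys_foldl_insert_key _
    (fun c => ((PySem.Str.split? c " = ").getD []).getD 0 "")
    (fun _ c => ((PySem.Str.split? c " = ").getD []).getD 1 "") _ (by simp)

-- recursive_decode computes the depth-(f+1) evaluation and only rewrites Shape entries
lemma pvRD (env : PySem.Dict String String) :
    ∀ f t d, pvIA env d → pvOp env f t = true → f ≤ env.size + 2 →
    ∃ d', pyRecursiveDecode (f + 1) d t = (d', some (pvEvS env (f + 1) t)) ∧ pvC env d d' ∧
      (PySem.Str.strIsdigit t = false → d'.get? t = some (pvEvS env (f + 1) t)) := by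
  intro f
  induction f with
  | zero =>
    intro t d hIA hop _
    have hd : PySem.Str.strIsdigit t = true := by
      rcases Bool.or_eq_true_iff.mp hop with h' | h'
      · exact h'
      · simp [pvRes] at h'
    refine ⟨d, ?_, pvC_refl env d, fun h => by rw [h] at hd; cases hd⟩
    rw [pyRecursiveDecode.eq_2, if_pos hd, pvEvS, if_pos hd]
  | succ f ih =>
    intro t d hIA hop hsz
    by_cases hd : PySem.Str.strIsdigit t = true
    · refine ⟨d, ?_, pvC_refl env d, fun h => by rw [h] at hd; cases hd⟩
      rw [pyRecursiveDecode.eq_2, if_pos hd, pvEvS, if_pos hd]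
    · have hres : pvRes env (f + 1) t = true := by
        rcases Bool.or_eq_true_iff.mp hop with h' | h'
        · exact absurd h' hd
        · exact h'
      rw [pvRes] at hres
      rcases hv : env.get? t with _ | v
      · rw [hv] at hres; simp at hres
      · rw [hv] at hres; dsimp only at hres
        rcases hIA.2 t with hdt | ⟨hsh, hdt⟩
        · -- entry still holds its original value v
          rw [hv] at hdt
          have hgetD : d.getD t "" = v := by
            rw [PySem.Dict.getD_eq_get?_getD, hdt]; rfl
          by_cases hvd : PySem.Str.strIsdigit v = true
          · refine ⟨d, ?_, pvC_refl env d, fun _ => ?_⟩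
            · rw [pyRecursiveDecode.eq_2, if_neg hd]
              simp only [hgetD, if_pos hvd]
              rw [pvEvS, if_neg hd, hv]
              dsimp only
              rw [if_pos hvd]
            · rw [hdt, pvEvS, if_neg hd, hv]
              dsimp only
              rw [if_pos hvd]
          · -- XOR expression: recurse on the two operands
            simp only [Bool.or_eq_true, Bool.and_eq_true] at hres
            rcases hres with h' | ⟨⟨hcar, hlen⟩, h3, h4⟩
            · exact absurd h' hvd
            · obtain ⟨d₁, heq1, hC1, hres1⟩ :=
                ih (((PySem.Str.split? v "^").getD []).getD 0 "") d hIA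
                  (pvOp_of_or h3) (by omega)
              obtain ⟨d₂, heq2, hC2, hres2⟩ :=
                ih (((PySem.Str.split? v "^").getD []).getD 1 "") d₁
                  (pvIA_of_pvC hIA hC1) (pvOp_of_or h4) (by omega)
              have hIA₂ := pvIA_of_pvC (pvIA_of_pvC hIA hC1) hC2
              have hshape : pvShape env t = true := by
                rw [pvShape, hv]
                dsimp only
                rw [Bool.and_eq_true, Bool.and_eq_true]
                simp only [Bool.not_eq_true']
                exact ⟨Bool.eq_false_iff.mpr hd, Bool.eq_false_iff.mpr hvd, hcar⟩
              have hval : pvEvS env (f + 1 + 1) t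
                  = PySem.Int.toStr (PySem.Int.bxor
                      ((PySem.Int.ofStr? (pvEvS env (f + 1)
                        (((PySem.Str.split? v "^").getD []).getD 0 ""))).getD 0)
                      ((PySem.Int.ofStr? (pvEvS env (f + 1)
                        (((PySem.Str.split? v "^").getD []).getD 1 ""))).getD 0)) := by
                rw [pvEvS, if_neg hd, hv]
                dsimp only
                rw [if_neg hvd]
              have hvV : pvEvS env (f + 1 + 1) t = pvV env t := by
                unfold pvV
                have : env.size + 3 = (env.size + 2) + 1 := rfl
                rw [this, pvEvS_stable env (f + 1) (env.size + 2) t hop (by omega)]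
              have hcont : d₂.contains t = true := by
                rw [PySem.Dict.contains_eq_isSome_get?]
                rcases hIA₂.2 t with h | ⟨_, h⟩
                · rw [h, hv]; rfl
                · rw [h]; rfl
              refine ⟨d₂.insert t (pvEvS env (f + 1 + 1) t), ?_, ?_, fun _ => ?_⟩
              · rw [pyRecursiveDecode.eq_2, if_neg hd]
                simp only [hgetD, if_neg hvd, if_pos hcar]
                rw [heq1]
                dsimp only
                rw [heq2]
                dsimp only
                simp only [Option.getD_some]
                rw [hval]
              · refine pvC_trans (pvC_trans hC1 hC2) ⟨?_, fun k => ?_⟩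
                · exact PySem.Dict.keys_insert_of_contains d₂ _ hcont
                · by_cases hk : k = t
                  · subst hk
                    exact Or.inr ⟨hshape, by rw [PySem.Dict.get?_insert_self, hvV]⟩
                  · exact Or.inl (PySem.Dict.get?_insert_of_ne d₂ _ hk)
              · rw [PySem.Dict.get?_insert_self]
        · -- entry already resolved to its final digit string
          have hopt : pvOp env (f + 1) t = true := hop
          have hvV : pvV env t = pvEvS env (f + 1 + 1) t := by
            unfold pvV
            have : env.size + 3 = (env.size + 2) + 1 := rfl
            rw [this, pvEvS_stable env (f + 1) (env.size + 2) t hopt (by omega)]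
          have hdig : PySem.Str.strIsdigit (pvV env t) = true := by
            rw [hvV]; exact pvEvS_digit env (f + 1) t hopt
          have hgetD : d.getD t "" = pvV env t := by
            rw [PySem.Dict.getD_eq_get?_getD, hdt]; rfl
          refine ⟨d, ?_, pvC_refl env d, fun _ => ?_⟩
          · rw [pyRecursiveDecode.eq_2, if_neg hd]
            simp only [hgetD, if_pos hdig]
            rw [hvV]
          · rw [hdt, hvV]

-- a Shape entry is resolvable within depth size+2 (from the evaluation precondition)
lemma pvShape_res (env : PySem.Dict String String) (hPre : pvPreEnv env) (k : String)
    (hsh : pvShape env k = true) : pvRes env (env.size + 2) k = true := by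
  rw [pvShape] at hsh
  rcases hv : env.get? k with _ | v
  · rw [hv] at hsh; simp at hsh
  · rw [hv] at hsh; dsimp only at hsh
    simp only [Bool.and_eq_true, Bool.not_eq_true'] at hsh
    obtain ⟨hdk, hdv, hcar⟩ := hsh
    obtain ⟨hlen, hl, hr⟩ := hPre (k, v) (PySem.Dict.mem_items_of_get?_eq_some env hv) hdk hdv hcar
    dsimp only at hlen hl hr
    unfold pvOp at hl hr
    rw [show env.size + 2 = (env.size + 1) + 1 from rfl, pvRes, hv]
    dsimp only
    rw [Bool.or_eq_true, Bool.and_eq_true, Bool.and_eq_true]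
    exact Or.inr ⟨⟨hcar, by simp [hlen]⟩, by rw [Bool.and_eq_true]; exact ⟨hl, hr⟩⟩

-- A's top-level loop: resolves every Shape key it passes over
lemma pvFoldA (env : PySem.Dict String String) (hPre : pvPreEnv env) :
    ∀ (ks : List String) (d : PySem.Dict String String),
      (∀ k ∈ ks, k ∈ env.keys) → pvIA env d →
    pvIA env (ks.foldl (fun d var => (pyRecursiveDecode (env.size + 3) d var).1) d) ∧
    pvC env d (ks.foldl (fun d var => (pyRecursiveDecode (env.size + 3) d var).1) d) ∧
    (∀ k ∈ ks, pvShape env k = true →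
      (ks.foldl (fun d var => (pyRecursiveDecode (env.size + 3) d var).1) d).get? k
        = some (pvV env k)) := by
  intro ks
  induction ks with
  | nil => intro d _ hIA; exact ⟨hIA, pvC_refl env d, by simp⟩
  | cons k ks ih =>
    intro d hmem hIA
    simp only [List.foldl_cons]
    by_cases hd : PySem.Str.strIsdigit k = true
    · have hstep : pyRecursiveDecode (env.size + 3) d k = (d, some k) := by
        rw [show env.size + 3 = (env.size + 2) + 1 from rfl, pyRecursiveDecode.eq_2, if_pos hd]
      rw [hstep]
      obtain ⟨hIA', hC', hresv⟩ := ih d (fun a ha => hmem a (by simp [ha])) hIA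
      refine ⟨hIA', hC', ?_⟩
      intro j hj hshj
      rcases List.mem_cons.mp hj with rfl | hj'
      · rw [pvShape, Bool.and_eq_true, Bool.not_eq_true'] at hshj
        rw [hshj.1] at hd; cases hd
      · exact hresv j hj' hshj
    · by_cases hsh : pvShape env k = true
      · have hop : pvOp env (env.size + 2) k = true :=
          pvOp_of_or (Or.inr (pvShape_res env hPre k hsh))
        obtain ⟨d', heq, hC, hresk⟩ := pvRD env (env.size + 2) k d hIA hop (le_refl _)
        rw [show env.size + 3 = (env.size + 2) + 1 from rfl, heq]
        obtain ⟨hIA', hC', hresv⟩ :=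
          ih d' (fun a ha => hmem a (by simp [ha])) (pvIA_of_pvC hIA hC)
        refine ⟨hIA', pvC_trans hC hC', ?_⟩
        intro j hj hshj
        rcases List.mem_cons.mp hj with rfl | hj'
        · have hk' : d'.get? j = some (pvV env j) := hresk (Bool.eq_false_iff.mpr hd)
          rcases hC'.2 j with h | ⟨_, h⟩
          · rw [h]; exact hk'
          · exact h
        · exact hresv j hj' hshj
      · -- inert entry: neither a digit key nor a rewritable XOR entry
        have hdk : d.get? k = env.get? k := by
          rcases hIA.2 k with h | ⟨hsh', _⟩
          · exact h
          · exact absurd hsh' hsh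
        rcases hv : env.get? k with _ | v
        · exact absurd ((PySem.Dict.get?_eq_none_iff_not_mem_keys env k).mp hv)
            (by simpa using hmem k (by simp))
        · have hgetD : d.getD k "" = v := by
            rw [PySem.Dict.getD_eq_get?_getD, hdk, hv]; rfl
          have hinert : PySem.Str.strIsdigit v = true ∨ PySem.Str.isIn "^" v = false := by
            by_cases hvd : PySem.Str.strIsdigit v = true
            · exact Or.inl hvd
            · right
              by_cases hc : PySem.Str.isIn "^" v = true
              · exfalso
                apply hsh
                rw [pvShape, hv]
                dsimp only
                rw [Bool.and_eq_true, Bool.and_eq_true]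
                simp only [Bool.not_eq_true']
                exact ⟨Bool.eq_false_iff.mpr hd, Bool.eq_false_iff.mpr hvd, hc⟩
              · exact Bool.eq_false_iff.mpr hc
          have hfst : (pyRecursiveDecode (env.size + 3) d k).1 = d := by
            rw [show env.size + 3 = (env.size + 2) + 1 from rfl, pyRecursiveDecode.eq_2,
              if_neg hd]
            simp only [hgetD]
            rcases hinert with hvd | hcar
            · rw [if_pos hvd]
            · by_cases hvd : PySem.Str.strIsdigit v = true
              · rw [if_pos hvd]
              · rw [if_neg hvd, if_neg (by rw [hcar]; simp)]
          rw [hfst]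
          obtain ⟨hIA', hC', hresv⟩ := ih d (fun a ha => hmem a (by simp [ha])) hIA
          refine ⟨hIA', hC', ?_⟩
          intro j hj hshj
          rcases List.mem_cons.mp hj with rfl | hj'
          · exact absurd hshj hsh
          · exact hresv j hj' hshj

-- the operand string B reads in a round
def pvOpstr (d : PySem.Dict String String) (t : String) : String :=
  if PySem.Str.strIsdigit t then t else d.getD t ""

-- a pending entry whose two operands are digit strings right now
def pvReady (env d : PySem.Dict String String) (k : String) : Bool :=
  PySem.Str.strIsdigit
    (pvOpstr d ((((PySem.Str.split? ((env.get? k).getD "") "^").getD []).getD 0 ""))) &&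
  PySem.Str.strIsdigit
    (pvOpstr d ((((PySem.Str.split? ((env.get? k).getD "") "^").getD []).getD 1 "")))

-- eliminating a Shape fact into its components
lemma pvShape_elim (env : PySem.Dict String String) (k : String) (h : pvShape env k = true) :
    ∃ v, env.get? k = some v ∧ PySem.Str.strIsdigit k = false ∧
      PySem.Str.strIsdigit v = false ∧ PySem.Str.isIn "^" v = true := by
  rw [pvShape] at h
  rcases hv : env.get? k with _ | v
  · rw [hv] at h; simp at h
  · rw [hv] at h; dsimp only at h
    rw [Bool.and_eq_true, Bool.and_eq_true] at h
    simp only [Bool.not_eq_true'] at h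
    exact ⟨v, rfl, h.1, h.2.1, h.2.2⟩

-- a resolved entry's final value is a digit string
lemma pvV_digit (env : PySem.Dict String String) (hPre : pvPreEnv env) (k : String)
    (hsh : pvShape env k = true) : PySem.Str.strIsdigit (pvV env k) = true := by
  have hop : pvOp env (env.size + 2) k = true :=
    pvOp_of_or (Or.inr (pvShape_res env hPre k hsh))
  have : pvV env k = pvEvS env ((env.size + 2) + 1) k := rfl
  rw [this]
  exact pvEvS_digit env (env.size + 2) k hop

-- a digit-valued operand string is the canonical evaluated string
lemma pvOpstr_val (env d : PySem.Dict String String) (t : String) (hIA : pvIA env d)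
    (hop : pvOp env (env.size + 1) t = true)
    (hd : PySem.Str.strIsdigit (pvOpstr d t) = true) :
    pvOpstr d t = pvEvS env (env.size + 2) t := by
  by_cases hdt : PySem.Str.strIsdigit t = true
  · rw [pvOpstr, if_pos hdt, show env.size + 2 = (env.size + 1) + 1 from rfl, pvEvS, if_pos hdt]
  · have hres : pvRes env (env.size + 1) t = true := by
      rcases Bool.or_eq_true_iff.mp hop with h' | h'
      · exact absurd h' hdt
      · exact h'
    rw [show env.size + 1 = env.size + 1 from rfl, pvRes] at hres
    rcases hv : env.get? t with _ | w
    · rw [hv] at hres; simp at hres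
    · rw [hv] at hres; dsimp only at hres
      rcases hIA.2 t with hdt' | ⟨hsh', hdt'⟩
      · rw [hv] at hdt'
        have hw : d.getD t "" = w := by rw [PySem.Dict.getD_eq_get?_getD, hdt']; rfl
        have hwd : PySem.Str.strIsdigit w = true := by
          rw [pvOpstr, if_neg hdt, hw] at hd; exact hd
        rw [pvOpstr, if_neg hdt, hw, show env.size + 2 = (env.size + 1) + 1 from rfl,
          pvEvS, if_neg hdt, hv]
        dsimp only
        rw [if_pos hwd]
      · have hw : d.getD t "" = pvV env t := by
          rw [PySem.Dict.getD_eq_get?_getD, hdt']; rfl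
        rw [pvOpstr, if_neg hdt, hw]
        unfold pvV
        rw [show env.size + 3 = (env.size + 2) + 1 from rfl,
          pvEvS_stable env (env.size + 1) (env.size + 2) t hop (by omega)]

-- readiness survives caching a digit string under any key
lemma pvReady_insert (env d : PySem.Dict String String) (k w j : String)
    (hw : PySem.Str.strIsdigit w = true) (hj : pvReady env d j = true) :
    pvReady env (d.insert k w) j = true := by
  rw [pvReady, Bool.and_eq_true] at hj ⊢
  refine ⟨?_, ?_⟩ <;> [have hc := hj.1; have hc := hj.2] <;>
  · rw [pvOpstr] at hc ⊢
    split at hc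
    · rwa [if_pos (by assumption)]
    · rw [if_neg (by assumption)]
      rw [PySem.Dict.getD_eq_get?_getD, PySem.Dict.get?_insert]
      split
      · exact hw
      · rwa [← PySem.Dict.getD_eq_get?_getD]

-- one relaxation round of B
lemma pvRound (env : PySem.Dict String String) (hPre : pvPreEnv env) :
    ∀ (pending : List String) (d : PySem.Dict String String) (acc : List String),
    pvIA env d → pending.Nodup → (∀ k ∈ pending, pvShape env k = true) →
    (∀ k ∈ pending, d.get? k = env.get? k) →
    ∃ d' p', pending.foldl pyRoundStep (d, acc) = (d', acc ++ p') ∧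
      p'.Sublist pending ∧ pvC env d d' ∧
      (∀ k ∈ pending, k ∉ p' → d'.get? k = some (pvV env k)) ∧
      (∀ j, j ∉ pending → d'.get? j = d.get? j) ∧
      (∀ k ∈ p', d'.get? k = env.get? k) ∧
      (∀ k ∈ pending, pvReady env d k = true → k ∉ p') := by
  intro pending
  induction pending with
  | nil =>
    intro d acc hIA _ _ _
    exact ⟨d, [], by simp, List.nil_sublist [], pvC_refl env d, by simp, fun _ _ => rfl,
      by simp, by simp⟩
  | cons k rest ih =>
    intro d acc hIA hnd hShape hUnres
    have hndr := List.nodup_cons.mp hnd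
    obtain ⟨v, hv, hdk, hdv, hcar⟩ := pvShape_elim env k (hShape k (by simp))
    have hget : d.getD k "" = v := by
      rw [PySem.Dict.getD_eq_get?_getD, hUnres k (by simp), hv]; rfl
    obtain ⟨hlen, hl, hr⟩ :=
      hPre (k, v) (PySem.Dict.mem_items_of_get?_eq_some env hv) hdk hdv hcar
    dsimp only at hlen hl hr
    have hcont : d.contains k = true := by
      rw [PySem.Dict.contains_eq_isSome_get?, hUnres k (by simp), hv]; rfl
    -- the round step, written through pvOpstr / pvReady
    have hstepv : pyRoundStep (d, acc) k =
        (if pvReady env d k = true then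
          (d.insert k (PySem.Int.toStr (PySem.Int.bxor
            ((PySem.Int.ofStr? (pvOpstr d (((PySem.Str.split? v "^").getD []).getD 0 ""))).getD 0)
            ((PySem.Int.ofStr? (pvOpstr d (((PySem.Str.split? v "^").getD []).getD 1 ""))).getD 0))),
            acc)
        else (d, acc ++ [k])) := by
      rw [pvReady, hv]
      simp only [pyRoundStep, hget, pvOpstr, Option.getD_some]
    simp only [List.foldl_cons]
    by_cases hready : pvReady env d k = true
    · -- k resolves in this round
      have h' := hready
      rw [pvReady, hv] at h'
      simp only [Option.getD_some, Bool.and_eq_true] at h'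
      obtain ⟨hdl, hdr⟩ := h'
      have hvalL := pvOpstr_val env d (((PySem.Str.split? v "^").getD []).getD 0 "") hIA hl hdl
      have hvalR := pvOpstr_val env d (((PySem.Str.split? v "^").getD []).getD 1 "") hIA hr hdr
      have hVk : pvV env k = PySem.Int.toStr (PySem.Int.bxor
            ((PySem.Int.ofStr? (pvEvS env (env.size + 2)
              (((PySem.Str.split? v "^").getD []).getD 0 ""))).getD 0)
            ((PySem.Int.ofStr? (pvEvS env (env.size + 2)
              (((PySem.Str.split? v "^").getD []).getD 1 ""))).getD 0)) := by
        unfold pvV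
        rw [show env.size + 3 = (env.size + 2) + 1 from rfl]
        conv_lhs => rw [pvEvS]
        rw [if_neg (by rw [hdk]; simp), hv]
        dsimp only
        rw [if_neg (by rw [hdv]; simp)]
      have hA : PySem.Int.toStr (PySem.Int.bxor
            ((PySem.Int.ofStr? (pvOpstr d (((PySem.Str.split? v "^").getD []).getD 0 ""))).getD 0)
            ((PySem.Int.ofStr? (pvOpstr d (((PySem.Str.split? v "^").getD []).getD 1 ""))).getD 0))
          = pvV env k := by
        rw [hvalL, hvalR]
        exact hVk.symm
      rw [hstepv, if_pos hready, hA]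
      have hC0 : pvC env d (d.insert k (pvV env k)) := by
        refine ⟨PySem.Dict.keys_insert_of_contains d _ hcont, fun j => ?_⟩
        by_cases hjk : j = k
        · subst hjk
          exact Or.inr ⟨hShape j (by simp), PySem.Dict.get?_insert_self d j (pvV env j)⟩
        · exact Or.inl (PySem.Dict.get?_insert_of_ne d _ hjk)
      obtain ⟨d', p'', hfold, hsub, hC', hresolved, huntouched, hunres, hready'⟩ :=
        ih (d.insert k (pvV env k)) acc (pvIA_of_pvC hIA hC0) hndr.2
          (fun j hj => hShape j (by simp [hj]))
          (fun j hj => by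
            rw [PySem.Dict.get?_insert_of_ne d _ (by rintro rfl; exact hndr.1 hj)]
            exact hUnres j (by simp [hj]))
      refine ⟨d', p'', ?_, hsub.trans (List.sublist_cons_self k rest),
        pvC_trans hC0 hC', ?_, ?_, hunres, ?_⟩
      · rw [hfold]
      · intro j hj hjp
        rcases List.mem_cons.mp hj with rfl | hj'
        · rw [huntouched j hndr.1, PySem.Dict.get?_insert_self]
        · exact hresolved j hj' hjp
      · intro j hj
        have hj' : j ∉ rest := fun hh => hj (by simp [hh])
        have hjk : j ≠ k := fun hh => hj (by simp [hh])
        rw [huntouched j hj', PySem.Dict.get?_insert_of_ne d _ hjk]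
      · intro j hj hrj
        rcases List.mem_cons.mp hj with rfl | hj'
        · exact fun hmem => hndr.1 (hsub.subset hmem)
        · exact hready' j hj'
            (pvReady_insert env d k (pvV env k) j (pvV_digit env hPre k (hShape k (by simp))) hrj)
    · rw [hstepv, if_neg hready]
      obtain ⟨d', p'', hfold, hsub, hC', hresolved, huntouched, hunres, hready'⟩ :=
        ih d (acc ++ [k]) hIA hndr.2 (fun j hj => hShape j (by simp [hj]))
          (fun j hj => hUnres j (by simp [hj]))
      refine ⟨d', k :: p'', ?_, hsub.cons₂ k, hC', ?_, ?_, ?_, ?_⟩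
      · rw [hfold, List.append_assoc]; rfl
      · intro j hj hjp
        rcases List.mem_cons.mp hj with rfl | hj'
        · exact absurd (by simp) hjp
        · exact hresolved j hj' (fun hh => hjp (by simp [hh]))
      · intro j hj
        exact huntouched j (fun hh => hj (by simp [hh]))
      · intro j hj
        rcases List.mem_cons.mp hj with rfl | hj'
        · rw [huntouched j hndr.1]; exact hUnres j (by simp)
        · exact hunres j hj'
      · intro j hj hrj
        rcases List.mem_cons.mp hj with rfl | hj'
        · rw [hrj] at hready; exact absurd rfl hready
        · intro hmem
          rcases List.mem_cons.mp hmem with rfl | hmem'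
          · exact absurd hj' hndr.1
          · exact hready' j hj' hrj hmem' 

-- progress: some pending entry is always ready (reference chains bottom out in digits)
lemma pvProgress (env : PySem.Dict String String) (hPre : pvPreEnv env)
    (pending : List String) (d : PySem.Dict String String)
    (hIA : pvIA env d) (hShape : ∀ k ∈ pending, pvShape env k = true)
    (_hUnres : ∀ k ∈ pending, d.get? k = env.get? k)
    (hCover : ∀ k, pvShape env k = true → k ∈ env.keys →
      k ∈ pending ∨ d.get? k = some (pvV env k))
    (hne : pending ≠ []) :
    ∃ k ∈ pending, pvReady env d k = true := by
  obtain ⟨k0, hk0⟩ := List.exists_mem_of_ne_nil pending hne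
  have hres0 : pvRes env (env.size + 2) k0 = true := pvShape_res env hPre k0 (hShape k0 hk0)
  suffices H : ∀ n, ∀ k ∈ pending, pvRes env n k = true →
      ∃ j ∈ pending, pvReady env d j = true from H _ k0 hk0 hres0
  intro n
  induction n using Nat.strong_induction_on with
  | _ n ind =>
    intro k hk hres
    by_cases hrd : pvReady env d k = true
    · exact ⟨k, hk, hrd⟩
    · obtain ⟨v, hv, hdk, hdv, hcar⟩ := pvShape_elim env k (hShape k hk)
      cases n with
      | zero => simp [pvRes] at hres
      | succ m =>
        rw [pvRes] at hres
        rw [hv] at hres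
        dsimp only at hres
        simp only [Bool.or_eq_true, Bool.and_eq_true] at hres
        rcases hres with h' | ⟨⟨_, _⟩, h3, h4⟩
        · rw [hdv] at h'; cases h'
        · rw [pvReady, hv] at hrd
          simp only [Option.getD_some, Bool.and_eq_true] at hrd
          -- a failing operand that is not yet a digit string leads to a smaller pending entry
          have key : ∀ t, (PySem.Str.strIsdigit t = true ∨ pvRes env m t = true) →
              PySem.Str.strIsdigit (pvOpstr d t) = false →
              ∃ j ∈ pending, pvReady env d j = true := by
            intro t hto hnd2
            have htd : PySem.Str.strIsdigit t = false := by
              by_cases h : PySem.Str.strIsdigit t = true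
              · rw [pvOpstr, if_pos h] at hnd2; rw [hnd2] at h; cases h
              · exact Bool.eq_false_iff.mpr h
            rcases hto with htd' | htres
            · rw [htd'] at htd; cases htd
            · cases m with
              | zero => simp [pvRes] at htres
              | succ m' =>
                have htres' := htres
                rw [pvRes] at htres'
                rcases hw : env.get? t with _ | w
                · rw [hw] at htres'; simp at htres'
                · rw [hw] at htres'; dsimp only at htres'
                  have hopstr : pvOpstr d t = d.getD t "" := by
                    rw [pvOpstr, if_neg (by rw [htd]; simp)]
                  by_cases hwd : PySem.Str.strIsdigit w = true
                  · -- the operand's stored value is already a digit string: contradiction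
                    rcases hIA.2 t with hdt | ⟨hsh', hdt⟩
                    · rw [hw] at hdt
                      rw [hopstr, PySem.Dict.getD_eq_get?_getD, hdt, Option.getD_some, hwd]
                        at hnd2
                      cases hnd2
                    · rw [hopstr, PySem.Dict.getD_eq_get?_getD, hdt, Option.getD_some,
                        pvV_digit env hPre t hsh'] at hnd2
                      cases hnd2
                  · -- the operand is itself an unresolved XOR entry, strictly shallower
                    have hwcar : PySem.Str.isIn "^" w = true := by
                      simp only [Bool.or_eq_true, Bool.and_eq_true] at htres'
                      rcases htres' with h' | ⟨⟨hc, _⟩, _, _⟩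
                      · exact absurd h' hwd
                      · exact hc
                    have hsh : pvShape env t = true := by
                      rw [pvShape, hw]
                      dsimp only
                      rw [Bool.and_eq_true, Bool.and_eq_true]
                      simp only [Bool.not_eq_true']
                      exact ⟨htd, Bool.eq_false_iff.mpr hwd, hwcar⟩
                    have hkeys : t ∈ env.keys := by
                      have hc : env.contains t = true := by
                        rw [PySem.Dict.contains_eq_isSome_get?, hw]; rfl
                      exact (PySem.Dict.contains_iff_mem_keys env t).mp hc
                    rcases hCover t hsh hkeys with htp | hres2
                    · exact ind (m' + 1) (by omega) t htp htres
                    · rw [hopstr, PySem.Dict.getD_eq_get?_getD, hres2, Option.getD_some,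
                        pvV_digit env hPre t hsh] at hnd2
                      cases hnd2
          by_cases hA : PySem.Str.strIsdigit
              (pvOpstr d (((PySem.Str.split? v "^").getD []).getD 0 "")) = true
          · refine key (((PySem.Str.split? v "^").getD []).getD 1 "") h4 ?_
            by_cases hB : PySem.Str.strIsdigit
                (pvOpstr d (((PySem.Str.split? v "^").getD []).getD 1 "")) = true
            · exact absurd ⟨hA, hB⟩ hrd
            · exact Bool.eq_false_iff.mpr hB
          · exact key (((PySem.Str.split? v "^").getD []).getD 0 "") h3
              (Bool.eq_false_iff.mpr hA)

-- B's while-loop resolves every Shape key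
lemma pvFixB (env : PySem.Dict String String) (hPre : pvPreEnv env) :
    ∀ (n : Nat) (pending : List String) (d : PySem.Dict String String),
    pending.length ≤ n → pvIA env d → pending.Nodup →
    (∀ k ∈ pending, pvShape env k = true) →
    (∀ k ∈ pending, d.get? k = env.get? k) →
    (∀ k, pvShape env k = true → k ∈ env.keys →
      k ∈ pending ∨ d.get? k = some (pvV env k)) →
    pvIA env (pyFix d pending) ∧
    (∀ k, pvShape env k = true → k ∈ env.keys →
      (pyFix d pending).get? k = some (pvV env k)) := by
  intro n
  induction n with
  | zero =>
    intro pending d hlen hIA _ _ _ hCover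
    have hpe : pending = [] := List.eq_nil_of_length_eq_zero (by omega)
    subst hpe
    rw [pyFix]
    simp only [List.isEmpty_nil, if_true]
    refine ⟨hIA, fun k hsh hk => ?_⟩
    rcases hCover k hsh hk with h | h
    · simp at h
    · exact h
  | succ n ih =>
    intro pending d hlen hIA hnd hShape hUnres hCover
    by_cases hpe : pending = []
    · subst hpe
      rw [pyFix]
      simp only [List.isEmpty_nil, if_true]
      refine ⟨hIA, fun k hsh hk => ?_⟩
      rcases hCover k hsh hk with h | h
      · simp at h
      · exact h
    · obtain ⟨d', p', hfold, hsub, hC, hresolved, huntouched, hunres, hready⟩ :=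
        pvRound env hPre pending d [] hIA hnd hShape hUnres
      obtain ⟨kk, hkmem, hkready⟩ :=
        pvProgress env hPre pending d hIA hShape hUnres hCover hpe
      have hknot : kk ∉ p' := hready kk hkmem hkready
      have hlt : p'.length < pending.length := by
        have hle := hsub.length_le
        rcases lt_or_eq_of_le hle with h | h
        · exact h
        · exact absurd (hsub.eq_of_length h ▸ hkmem) hknot
      have hrnd : pyRound d pending = (d', p') := by
        rw [pyRound, hfold]; rfl
      have hun : pyFix d pending = pyFix d' p' := by
        rw [pyFix, if_neg (by simp [List.isEmpty_iff, hpe]), hrnd,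
          if_neg (by intro hh; simp at hh; omega)]
      rw [hun]
      refine ih p' d' (by omega) (pvIA_of_pvC hIA hC) (hnd.sublist hsub)
        (fun j hj => hShape j (hsub.subset hj)) hunres ?_
      intro j hshj hjkeys
      rcases hCover j hshj hjkeys with hjp | hres
      · by_cases hjp' : j ∈ p'
        · exact Or.inl hjp'
        · exact Or.inr (hresolved j hjp hjp')
      · refine Or.inr ?_
        rcases hC.2 j with h | ⟨_, h⟩
        · rw [h]; exact hres
        · exact h

-- ===== VERDICT (by name: the statement is the Claim_ definition above) =====
theorem parse_crazy_encoding_spec : Claim_equal_parse_crazy_encoding := by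
  intro code _ hpre
  obtain ⟨_, hPre⟩ := hpre
  show parse_crazy_encoding code = parse_crazy_encoding_alt code
  have henvA : ((PySem.Str.split? code ";").getD []).foldl
      (fun d var =>
        if PySem.Str.isIn "=" var then
          let assignment := (PySem.Str.split? var " = ").getD []
          d.insert (assignment.getD 0 "") (assignment.getD 1 "")
        else d)
      PySem.Dict.empty = pvEnv code := rfl
  unfold parse_crazy_encoding parse_crazy_encoding_alt
  simp only [henvA]
  have hnd : (pvEnv code).keys.Nodup := pv_env_keys_nodup code
  set env := pvEnv code with henv
  -- B's worklist is the list of Shape keys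
  have hfiltereq : env.keys.filter
      (fun k => !PySem.Str.strIsdigit k && !PySem.Str.strIsdigit (env.getD k "") &&
                PySem.Str.isIn "^" (env.getD k ""))
      = env.keys.filter (fun k => pvShape env k) := by
    apply List.filter_congr
    intro k hk
    rcases hvk : env.get? k with _ | v
    · exact absurd hk ((PySem.Dict.get?_eq_none_iff_not_mem_keys env k).mp hvk)
    · have hgd : env.getD k "" = v := by
        rw [PySem.Dict.getD_eq_get?_getD, hvk]; rfl
      rw [hgd, pvShape, hvk]
      dsimp only
      rw [Bool.and_assoc]
  rw [hfiltereq]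
  obtain ⟨hIAA, -, hresA⟩ :=
    pvFoldA env hPre env.keys env (fun _ h => h) ⟨rfl, fun _ => Or.inl rfl⟩
  obtain ⟨hIAB, hresB⟩ :=
    pvFixB env hPre (env.keys.filter (fun k => pvShape env k)).length
      (env.keys.filter (fun k => pvShape env k)) env (le_refl _)
      ⟨rfl, fun _ => Or.inl rfl⟩ (hnd.filter _)
      (fun k hk => (List.mem_filter.mp hk).2)
      (fun _ _ => rfl)
      (fun k hsh hk => Or.inl (List.mem_filter.mpr ⟨hk, hsh⟩))
  have hkeysA := hIAA.1
  have hkeysB := hIAB.1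
  rw [PySem.Dict.items_eq_map_keys _ (by rw [hkeysA]; exact hnd) "",
    PySem.Dict.items_eq_map_keys _ (by rw [hkeysB]; exact hnd) "", hkeysA, hkeysB]
  apply List.map_congr_left
  intro k hk
  have hval : (env.keys.foldl (fun d var => (pyRecursiveDecode (env.size + 3) d var).1) env).getD k ""
      = (pyFix env (env.keys.filter (fun k => pvShape env k))).getD k "" := by
    by_cases hsh : pvShape env k = true
    · rw [PySem.Dict.getD_eq_get?_getD, hresA k hk hsh,
        PySem.Dict.getD_eq_get?_getD, hresB k hsh hk]
    · have hA' : (env.keys.foldl (fun d var => (pyRecursiveDecode (env.size + 3) d var).1) env).get? k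
          = env.get? k := by
        rcases hIAA.2 k with h | ⟨hsh', _⟩
        · exact h
        · exact absurd hsh' hsh
      have hB' : (pyFix env (env.keys.filter (fun k => pvShape env k))).get? k = env.get? k := by
        rcases hIAB.2 k with h | ⟨hsh', _⟩
        · exact h
        · exact absurd hsh' hsh
      rw [PySem.Dict.getD_eq_get?_getD, hA', PySem.Dict.getD_eq_get?_getD, hB']
  rw [hval]
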